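-- pv_equiv track=rewrite | github.com/htrc/torchlite-backend | htrc/torchlite/widgets/simple_tag_cloud.py | aggregate_word_counts
-- ===== SOURCE A (Python) =====
-- def aggregate_word_counts(word_counts: dict) -> dict:
--     aggregated_counts = {}
--
--     if word_counts:
--         for word, count in word_counts.items():
--             lower_word = word.lower()
--
--             if lower_word in aggregated_counts:
--                 aggregated_counts[lower_word] += count
--             else:
--                 aggregated_counts[lower_word] = count
--
--     return aggregated_counts
-- ===== SOURCE B (Python) =====
-- def aggregate_word_counts(word_counts: dict) -> dict:
--     pairs = [(word.lower(), count) for word, count in word_counts.items()]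
--     keys = []
--     for word, _ in pairs:
--         if word not in keys:
--             keys.append(word)
--     return {key: sum(c for w, c in pairs if w == key) for key in keys}
-- ===== Notes on version B (the rewrite author's own statement) =====
-- stated objective: alternative
-- what changed: Replaces A's single accumulating-dict pass by a two-phase computation: lowercase all pairs, collect the distinct lowered keys in first-occurrence order, then build the result by summing each key's counts with a direct scan.
import Mathlib
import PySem

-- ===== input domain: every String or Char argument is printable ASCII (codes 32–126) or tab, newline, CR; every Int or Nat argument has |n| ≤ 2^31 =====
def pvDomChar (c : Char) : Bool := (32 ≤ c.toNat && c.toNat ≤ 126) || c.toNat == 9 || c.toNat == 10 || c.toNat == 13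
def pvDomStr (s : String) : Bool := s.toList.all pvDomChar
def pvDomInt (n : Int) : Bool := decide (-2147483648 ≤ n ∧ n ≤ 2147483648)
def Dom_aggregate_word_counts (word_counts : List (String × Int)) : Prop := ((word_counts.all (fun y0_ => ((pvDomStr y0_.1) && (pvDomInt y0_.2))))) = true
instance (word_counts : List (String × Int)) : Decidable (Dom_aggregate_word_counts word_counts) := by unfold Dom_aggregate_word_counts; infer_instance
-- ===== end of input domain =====

-- B replaces the single dict-accumulating pass by a two-phase pass (distinct lowered keys first, then a per-key sum); objective: alternative structure, not speed.

-- ===== PORT A =====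
def aggregate_word_counts (word_counts : List (String × Int)) : List (String × Int) :=
  let aggregated_counts : PySem.Dict String Int :=
    if word_counts.isEmpty then PySem.Dict.empty
    else
      word_counts.foldl (fun d p =>
        let lower_word := PySem.Str.lower p.1
        if d.contains lower_word then d.insert lower_word (d.getD lower_word 0 + p.2)
        else d.insert lower_word p.2) PySem.Dict.empty
  aggregated_counts.items

-- ===== PORT B =====
def aggregate_word_counts_alt (word_counts : List (String × Int)) : List (String × Int) :=
  let pairs := word_counts.map (fun p => (PySem.Str.lower p.1, p.2))
  let keys := pairs.foldl (fun ks p => if ks.contains p.1 then ks else ks ++ [p.1]) ([] : List String)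
  keys.map (fun k => (k, ((pairs.filter (fun p => p.1 == k)).map (fun p => p.2)).sum))

-- ===== PRECONDITION & SPEC =====
def Spec_aggregate_word_counts (word_counts : List (String × Int)) (out : List (String × Int)) : Prop := out = aggregate_word_counts_alt word_counts
instance (word_counts : List (String × Int)) (out : List (String × Int)) : Decidable (Spec_aggregate_word_counts word_counts out) := by unfold Spec_aggregate_word_counts; infer_instance

-- ===== CLAIM (what is proved, stated in full; the proofs are below) =====
def Claim_equal_aggregate_word_counts : Prop := ∀ (word_counts : List (String × Int)), Dom_aggregate_word_counts word_counts → Spec_aggregate_word_counts word_counts (aggregate_word_counts word_counts)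

-- ===== LEMMAS AND PROOFS =====

-- A's loop body always stores (old value or 0) + count
theorem pv_stepA_eq :
    (fun (d : PySem.Dict String Int) (p : String × Int) =>
      let lower_word := PySem.Str.lower p.1
      if d.contains lower_word then d.insert lower_word (d.getD lower_word 0 + p.2)
      else d.insert lower_word p.2)
    = fun d p => d.insert (PySem.Str.lower p.1) (d.getD (PySem.Str.lower p.1) 0 + p.2) := by
  funext d p
  by_cases h : d.contains (PySem.Str.lower p.1)
  · simp [h]
  · have h0 : d.getD (PySem.Str.lower p.1) 0 = 0 :=
      PySem.Dict.getD_of_not_contains d 0 (by simpa using h)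
    simp [h, h0]

theorem pv_getD_fold (l : List (String × Int)) :
    ∀ (d : PySem.Dict String Int) (k : String),
      (l.foldl (fun d p => d.insert (PySem.Str.lower p.1) (d.getD (PySem.Str.lower p.1) 0 + p.2)) d).getD k 0
      = d.getD k 0 + ((l.filter (fun p => PySem.Str.lower p.1 == k)).map (fun p => p.2)).sum := by
  induction l with
  | nil => intro d k; simp
  | cons p l ih =>
    intro d k
    simp only [List.foldl_cons, ih, List.filter_cons]
    by_cases h : PySem.Str.lower p.1 = k
    · simp [h]
      ring
    · simp [PySem.Dict.getD_insert, Ne.symm h, h]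

theorem pv_dedup_eq_ofList (pairs : List (String × Int)) :
    pairs.foldl (fun ks p => if ks.contains p.1 then ks else ks ++ [p.1]) ([] : List String)
    = PySem.Set.ofList (pairs.map (fun p => p.1)) := by
  have hstep : (fun (ks : List String) (p : String × Int) => if ks.contains p.1 then ks else ks ++ [p.1])
      = fun ks p => PySem.Set.add ks p.1 := by
    funext ks p
    rw [PySem.Set.add_eq_ite]
    by_cases hm : p.1 ∈ ks
    · simp [hm]
    · simp [hm]
  rw [hstep, ← PySem.Set.update_map_eq_foldl_add pairs (fun p => p.1) [],
    PySem.Set.update_nil_left]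

-- ===== VERDICT (by name: the statement is the Claim_ definition above) =====
theorem aggregate_word_counts_spec : Claim_equal_aggregate_word_counts := by
  intro wc _
  unfold Spec_aggregate_word_counts aggregate_word_counts aggregate_word_counts_alt
  cases wc with
  | nil => rfl
  | cons q t =>
    simp only [List.isEmpty_cons, Bool.false_eq_true, if_false, pv_stepA_eq,
      pv_dedup_eq_ofList]
    have hnd : ((q :: t).foldl (fun d p => d.insert (PySem.Str.lower p.1) (d.getD (PySem.Str.lower p.1) 0 + p.2)) PySem.Dict.empty).keys.Nodup :=
      PySem.Dict.nodup_keys_foldl_insert_key (q :: t) (fun p => PySem.Str.lower p.1) _ _ (by simp [PySem.Dict.keys_empty])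
    rw [PySem.Dict.items_eq_map_keys _ hnd 0]
    have hkeysA : ((q :: t).foldl (fun d p => d.insert (PySem.Str.lower p.1) (d.getD (PySem.Str.lower p.1) 0 + p.2)) PySem.Dict.empty).keys
        = PySem.Set.ofList ((q :: t).map (fun p => PySem.Str.lower p.1)) := by
      rw [PySem.Dict.keys_foldl_insert_key, PySem.Dict.keys_empty, PySem.Set.update_nil_left]
    rw [hkeysA]
    simp only [List.map_map, Function.comp_def]
    apply List.map_congr_left
    intro k _
    rw [pv_getD_fold]
    simp only [PySem.Dict.getD_empty, zero_add, List.filter_map, List.map_map]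
    simp [Function.comp_def]
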